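-- pv_equiv track=rewrite | github.com/stereoabuse/codewars | problems/maximum_length_difference.py | mxdiflg
-- ===== SOURCE A (Python) =====
-- def mxdiflg(a1, a2):
--     a3 = []
--     for item in a1:
--         for otheritem in a2:
--             a3.append(abs(len(item) - len(otheritem)))
--     if len(a3) > 0:
--         return sorted(a3, reverse = True)[0]
--     else:
--         return -1
-- ===== SOURCE B (Python) =====
-- def mxdiflg(a1, a2):
--     if not a1 or not a2:
--         return -1
--     lo1 = hi1 = len(a1[0])
--     for s in a1[1:]:
--         n = len(s)
--         lo1 = min(lo1, n)
--         hi1 = max(hi1, n)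
--     lo2 = hi2 = len(a2[0])
--     for s in a2[1:]:
--         n = len(s)
--         lo2 = min(lo2, n)
--         hi2 = max(hi2, n)
--     return max(hi1 - lo2, hi2 - lo1)
-- ===== Notes on version B (the rewrite author's own statement) =====
-- stated objective: faster
-- what changed: Instead of materialising all n*m pairwise length differences and sorting them descending, B computes min/max string lengths of each list in one pass each and returns max(hi1-lo2, hi2-lo1).
import Mathlib
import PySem

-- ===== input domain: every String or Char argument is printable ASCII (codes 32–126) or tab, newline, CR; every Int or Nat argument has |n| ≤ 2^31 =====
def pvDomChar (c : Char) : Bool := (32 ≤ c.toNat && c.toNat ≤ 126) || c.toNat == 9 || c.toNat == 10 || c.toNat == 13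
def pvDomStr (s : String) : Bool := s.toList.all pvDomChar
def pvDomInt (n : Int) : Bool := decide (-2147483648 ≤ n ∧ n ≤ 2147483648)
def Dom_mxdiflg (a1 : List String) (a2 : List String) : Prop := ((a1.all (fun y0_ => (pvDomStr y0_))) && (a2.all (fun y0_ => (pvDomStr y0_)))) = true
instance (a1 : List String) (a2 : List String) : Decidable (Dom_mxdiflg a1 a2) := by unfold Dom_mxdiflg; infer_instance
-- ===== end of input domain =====

-- B replaces A's "build all n*m pairwise |len differences|, sort descending, take head"
-- by one min/max pass over each list's lengths combined as max(hi1-lo2, hi2-lo1).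

-- ===== PORT A =====
def mxdiflg (a1 : List String) (a2 : List String) : Int :=
  let a3 : List Int := a1.foldl (fun acc item =>
    a2.foldl (fun acc2 otheritem => acc2 ++ [|PySem.Str.len item - PySem.Str.len otheritem|]) acc) []
  if a3.length > 0 then (PySem.List.sorted a3 (fun x => x) true).headI else -1

-- ===== PORT B =====
-- running min/max of lengths, seeded with the first element's length (Source B's loop over xs[1:])
def pvMinMaxLen (s : String) (rest : List String) : Int × Int :=
  rest.foldl (fun p u => (min p.1 (PySem.Str.len u), max p.2 (PySem.Str.len u)))
    (PySem.Str.len s, PySem.Str.len s)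

def mxdiflg_alt (a1 : List String) (a2 : List String) : Int :=
  match a1, a2 with
  | [], _ => -1
  | _, [] => -1
  | s :: t, u :: v =>
    let p1 := pvMinMaxLen s t
    let p2 := pvMinMaxLen u v
    max (p1.2 - p2.1) (p2.2 - p1.1)

-- ===== PRECONDITION & SPEC =====
def Spec_mxdiflg (a1 : List String) (a2 : List String) (out : Int) : Prop := out = mxdiflg_alt a1 a2
instance (a1 : List String) (a2 : List String) (out : Int) : Decidable (Spec_mxdiflg a1 a2 out) := by unfold Spec_mxdiflg; infer_instance

-- ===== CLAIM (what is proved, stated in full; the proofs are below) =====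
def Claim_equal_mxdiflg : Prop := ∀ (a1 : List String) (a2 : List String), Dom_mxdiflg a1 a2 → Spec_mxdiflg a1 a2 (mxdiflg a1 a2)

-- ===== LEMMAS AND PROOFS =====

-- A's accumulated list is the flatMap of all pairwise absolute length differences
theorem pv_a3_eq (a1 a2 : List String) (acc : List Int) :
    a1.foldl (fun acc item =>
      a2.foldl (fun acc2 otheritem => acc2 ++ [|PySem.Str.len item - PySem.Str.len otheritem|]) acc) acc
    = acc ++ a1.flatMap (fun x => a2.map (fun y => |PySem.Str.len x - PySem.Str.len y|)) := by
  induction a1 generalizing acc with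
  | nil => simp
  | cons h t ih =>
    simp only [List.foldl_cons, List.flatMap_cons,
      PySem.List.foldl_append_singleton_eq_map, PySem.List.foldl_append_eq_flatMap,
      List.append_assoc]

-- invariant of B's running min/max fold
theorem pv_mm (t : List String) (a b : Int) :
    (t.foldl (fun p u => (min p.1 (PySem.Str.len u), max p.2 (PySem.Str.len u))) (a, b)).1 ≤ a
    ∧ b ≤ (t.foldl (fun p u => (min p.1 (PySem.Str.len u), max p.2 (PySem.Str.len u))) (a, b)).2
    ∧ (∀ x ∈ t,
        (t.foldl (fun p u => (min p.1 (PySem.Str.len u), max p.2 (PySem.Str.len u))) (a, b)).1 ≤ PySem.Str.len x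
        ∧ PySem.Str.len x ≤ (t.foldl (fun p u => (min p.1 (PySem.Str.len u), max p.2 (PySem.Str.len u))) (a, b)).2)
    ∧ ((t.foldl (fun p u => (min p.1 (PySem.Str.len u), max p.2 (PySem.Str.len u))) (a, b)).1 = a
        ∨ ∃ x ∈ t, PySem.Str.len x = (t.foldl (fun p u => (min p.1 (PySem.Str.len u), max p.2 (PySem.Str.len u))) (a, b)).1)
    ∧ ((t.foldl (fun p u => (min p.1 (PySem.Str.len u), max p.2 (PySem.Str.len u))) (a, b)).2 = b
        ∨ ∃ x ∈ t, PySem.Str.len x = (t.foldl (fun p u => (min p.1 (PySem.Str.len u), max p.2 (PySem.Str.len u))) (a, b)).2) := by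
  induction t generalizing a b with
  | nil => simp
  | cons h t ih =>
    obtain ⟨h1, h2, h3, h4, h5⟩ := ih (min a (PySem.Str.len h)) (max b (PySem.Str.len h))
    simp only [List.foldl_cons]
    refine ⟨le_trans h1 (min_le_left _ _), le_trans (le_max_left _ _) h2, ?_, ?_, ?_⟩
    · intro x hx
      rcases List.mem_cons.mp hx with hx | hx
      · subst hx
        exact ⟨le_trans h1 (min_le_right _ _), le_trans (le_max_right _ _) h2⟩
      · exact h3 x hx
    · rcases h4 with h4 | ⟨x, hx, hlx⟩
      · rcases le_total a (PySem.Str.len h) with hc | hc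
        · left; rw [h4]; exact min_eq_left hc
        · right; exact ⟨h, List.mem_cons_self, by rw [h4]; exact (min_eq_right hc).symm⟩
      · right; exact ⟨x, List.mem_cons_of_mem _ hx, hlx⟩
    · rcases h5 with h5 | ⟨x, hx, hlx⟩
      · rcases le_total (PySem.Str.len h) b with hc | hc
        · left; rw [h5]; exact max_eq_left hc
        · right; exact ⟨h, List.mem_cons_self, by rw [h5]; exact (max_eq_right hc).symm⟩
      · right; exact ⟨x, List.mem_cons_of_mem _ hx, hlx⟩

-- ===== VERDICT (by name: the statement is the Claim_ definition above) =====
theorem mxdiflg_spec : Claim_equal_mxdiflg := by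
  intro a1 a2 _
  unfold Spec_mxdiflg mxdiflg mxdiflg_alt
  match a1, a2 with
  | [], a2 => simp
  | (s :: t), [] => simp
  | (s :: t), (u :: v) =>
    simp only [pv_a3_eq, List.nil_append]
    set f : String → String → Int := fun x y => |PySem.Str.len x - PySem.Str.len y| with hf
    set a3 : List Int := (s :: t).flatMap (fun x => (u :: v).map (f x)) with ha3
    have hne : a3 ≠ [] := by simp [ha3]
    -- min/max facts for both lists
    obtain ⟨q11, q12, q13, q14, q15⟩ := pv_mm t (PySem.Str.len s) (PySem.Str.len s)
    obtain ⟨q21, q22, q23, q24, q25⟩ := pv_mm v (PySem.Str.len u) (PySem.Str.len u)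
    set lo1 := (pvMinMaxLen s t).1 with hlo1
    set hi1 := (pvMinMaxLen s t).2 with hhi1
    set lo2 := (pvMinMaxLen u v).1 with hlo2
    set hi2 := (pvMinMaxLen u v).2 with hhi2
    have hb1 : ∀ x ∈ s :: t, lo1 ≤ PySem.Str.len x ∧ PySem.Str.len x ≤ hi1 := by
      intro x hx
      rcases List.mem_cons.mp hx with hx | hx
      · subst hx; exact ⟨q11, q12⟩
      · exact q13 x hx
    have hb2 : ∀ y ∈ u :: v, lo2 ≤ PySem.Str.len y ∧ PySem.Str.len y ≤ hi2 := by
      intro y hy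
      rcases List.mem_cons.mp hy with hy | hy
      · subst hy; exact ⟨q21, q22⟩
      · exact q23 y hy
    have hex1hi : ∃ x ∈ s :: t, PySem.Str.len x = hi1 := by
      rcases q15 with h | ⟨x, hx, hlx⟩
      · exact ⟨s, List.mem_cons_self, h.symm⟩
      · exact ⟨x, List.mem_cons_of_mem _ hx, hlx⟩
    have hex1lo : ∃ x ∈ s :: t, PySem.Str.len x = lo1 := by
      rcases q14 with h | ⟨x, hx, hlx⟩
      · exact ⟨s, List.mem_cons_self, h.symm⟩
      · exact ⟨x, List.mem_cons_of_mem _ hx, hlx⟩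
    have hex2hi : ∃ y ∈ u :: v, PySem.Str.len y = hi2 := by
      rcases q25 with h | ⟨y, hy, hly⟩
      · exact ⟨u, List.mem_cons_self, h.symm⟩
      · exact ⟨y, List.mem_cons_of_mem _ hy, hly⟩
    have hex2lo : ∃ y ∈ u :: v, PySem.Str.len y = lo2 := by
      rcases q24 with h | ⟨y, hy, hly⟩
      · exact ⟨u, List.mem_cons_self, h.symm⟩
      · exact ⟨y, List.mem_cons_of_mem _ hy, hly⟩
    have hlh1 : lo1 ≤ hi1 := by have := hb1 s List.mem_cons_self; omega
    have hlh2 : lo2 ≤ hi2 := by have := hb2 u List.mem_cons_self; omega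
    set tgt : Int := max (hi1 - lo2) (hi2 - lo1) with htgt
    -- every element of a3 is ≤ tgt
    have hub : ∀ z ∈ a3, z ≤ tgt := by
      intro z hz
      simp only [ha3, List.mem_flatMap, List.mem_map] at hz
      obtain ⟨x, hx, y, hy, hzxy⟩ := hz
      have b1 := hb1 x hx
      have b2 := hb2 y hy
      subst hzxy
      rw [hf]
      simp only
      rw [abs_sub_le_iff]
      constructor
      · refine le_trans ?_ (le_max_left (hi1 - lo2) (hi2 - lo1)); omega
      · refine le_trans ?_ (le_max_right (hi1 - lo2) (hi2 - lo1)); omega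
    -- tgt is attained in a3
    have hmem : tgt ∈ a3 := by
      obtain ⟨xh, hxh, hxhl⟩ := hex1hi
      obtain ⟨xl, hxl, hxll⟩ := hex1lo
      obtain ⟨yh, hyh, hyhl⟩ := hex2hi
      obtain ⟨yl, hyl, hyll⟩ := hex2lo
      rcases le_total (hi2 - lo1) (hi1 - lo2) with hc | hc
      · have htv : tgt = f xh yl := by
          rw [htgt, hf]; simp only
          rw [max_eq_left hc, hxhl, hyll, abs_of_nonneg (by omega)]
        rw [htv]
        simp only [ha3, List.mem_flatMap, List.mem_map]
        exact ⟨xh, hxh, yl, hyl, rfl⟩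
      · have htv : tgt = f xl yh := by
          rw [htgt, hf]; simp only
          rw [max_eq_right hc, hxll, hyhl, abs_sub_comm, abs_of_nonneg (by omega)]
        rw [htv]
        simp only [ha3, List.mem_flatMap, List.mem_map]
        exact ⟨xl, hxl, yh, hyh, rfl⟩
    -- the head of the descending sort is the maximum, i.e. tgt
    obtain ⟨m, tl, hsort⟩ : ∃ m tl, PySem.List.sorted a3 (fun x => x) true = m :: tl := by
      cases hs : PySem.List.sorted a3 (fun x => x) true with
      | nil => exact absurd (((PySem.List.sorted_eq_nil_iff a3 (fun x => x) true).mp hs)) hne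
      | cons m tl => exact ⟨m, tl, rfl⟩
    have hmmem : m ∈ a3 := by
      have hp := PySem.List.sorted_perm a3 (fun x => x) true
      exact hp.mem_iff.mp (by rw [hsort]; exact List.mem_cons_self)
    have hge := PySem.List.key_head_sorted_rev_ge a3 (fun x => x) hsort
    have hlen : a3.length > 0 := List.length_pos_of_ne_nil hne
    rw [if_pos hlen, hsort]
    simp only [List.headI]
    exact le_antisymm (hub m hmmem) (hge tgt hmem)
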